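-- pv_equiv track=rewrite | github.com/haoyuhsu/Mini-Games-with-Pygame | 2048/2048.py | MovingDown
-- ===== SOURCE A (Python) =====
-- def MovingDown(numberList):
--     for j in range(4):
--         num = [0,0,0,0]
--         count = 3
--         i = 3
--         while (i >= 0):
--             if (numberList[i][j]!=0):
--                 k = 1
--                 check = 0
--                 while (check==0 and i-k >= 0):
--                     check = 1
--                     if (i-k >= 0):
--                         if (numberList[i-k][j]==0 and i-k > 0):
--                             k+=1
--                             check = 0
--                         else:
--                             if (numberList[i][j]==numberList[i-k][j]):
--                                 num[count] = numberList[i][j]*2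
--                                 count -= 1
--                                 k+=1
--                             else:
--                                 num[count] = numberList[i][j]
--                                 count -= 1
--                 if (i==0):
--                     num[count] = numberList[i][j]
--                 i-=k
--             else:
--             	i-=1
--         numberList[0][j] = num[0]
--         numberList[1][j] = num[1]
--         numberList[2][j] = num[2]
--         numberList[3][j] = num[3]
--     return numberList
-- ===== SOURCE B (Python) =====
-- def MovingDown(numberList):
--     for j in range(4):
--         tiles = [numberList[i][j] for i in range(3, -1, -1) if numberList[i][j] != 0]
--         merged = []
--         t = 0
--         while t < len(tiles):
--             if t + 1 < len(tiles) and tiles[t] == tiles[t + 1]: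
--                 merged.append(tiles[t] * 2)
--                 t += 2
--             else:
--                 merged.append(tiles[t])
--                 t += 1
--         for i in range(4):
--             numberList[i][j] = merged[3 - i] if 3 - i < len(merged) else 0
--     return numberList
-- ===== Notes on version B (the rewrite author's own statement) =====
-- stated objective: simpler
-- what changed: Each column is rebuilt as compress-nonzeros (bottom-up) + one front-to-back merge scan + zero-padding, replacing A's nested while loops with index/skip/check-flag bookkeeping.
import Mathlib
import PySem

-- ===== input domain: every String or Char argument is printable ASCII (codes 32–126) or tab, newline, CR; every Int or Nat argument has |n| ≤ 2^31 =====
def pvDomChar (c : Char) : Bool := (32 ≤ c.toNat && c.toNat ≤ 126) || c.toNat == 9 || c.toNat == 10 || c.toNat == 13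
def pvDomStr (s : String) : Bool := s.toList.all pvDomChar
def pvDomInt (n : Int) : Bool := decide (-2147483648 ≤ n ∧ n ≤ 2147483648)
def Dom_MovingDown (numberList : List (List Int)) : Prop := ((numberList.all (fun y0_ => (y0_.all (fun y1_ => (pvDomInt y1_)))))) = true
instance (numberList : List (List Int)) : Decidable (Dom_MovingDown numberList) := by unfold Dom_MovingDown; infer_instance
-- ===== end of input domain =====

-- B rebuilds each column as compress-nonzeros + single merge scan + pad, instead of A's
-- nested index/while bookkeeping; objective: simpler. Both Pythons mutate numberList in
-- place the same way; the proof is about the returned value.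

-- shared cell access (both Pythons read/write numberList[i][j]; in range under Pre_)
def pvGetCell (nl : List (List Int)) (i j : Nat) : Int := (nl.getD i []).getD j 0
def pvSetCell (nl : List (List Int)) (i j : Nat) (v : Int) : List (List Int) :=
  nl.set i ((nl.getD i []).set j v)

-- ===== PORT A =====
-- inner 'while check==0 and i-k>=0' loop of A; returns (num, count, k).
-- count never goes below 0 in A (at most 4 writes), so Nat subtraction is exact here.
def aInner (col : Nat → Int) (i k : Nat) (num : List Int) (count : Nat) :
    List Int × Nat × Nat :=
  if h : k ≤ i then
    if col (i - k) = 0 ∧ i - k > 0 then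
      aInner col i (k + 1) num count
    else
      if col i = col (i - k) then
        (num.set count (col i * 2), count - 1, k + 1)
      else
        (num.set count (col i), count - 1, k)
  else (num, count, k)
termination_by i - k
decreasing_by omega

-- outer 'while i >= 0' loop, with fuel = i + 1; k ≥ 1 always, so fm - (k-1) = fuel - k
def aOuter (col : Nat → Int) (fuel : Nat) (num : List Int) (count : Nat) : List Int :=
  match fuel with
  | 0 => num
  | fm + 1 =>
    if col fm ≠ 0 then
      match aInner col fm 1 num count with
      | (num', count', k) =>
        aOuter col (fm - (k - 1)) (if fm = 0 then num'.set count' (col fm) else num') count'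
    else aOuter col fm num count
termination_by fuel
decreasing_by all_goals omega

def aCol (col : Nat → Int) : List Int := aOuter col 4 [0, 0, 0, 0] 3

-- body of A's 'for j in range(4)' loop: compute num, then the four write-backs
def aStep (nl : List (List Int)) (j : Nat) : List (List Int) :=
  let num := aCol (fun i => pvGetCell nl i j)
  let nl := pvSetCell nl 0 j (num.getD 0 0)
  let nl := pvSetCell nl 1 j (num.getD 1 0)
  let nl := pvSetCell nl 2 j (num.getD 2 0)
  pvSetCell nl 3 j (num.getD 3 0)

def MovingDown (numberList : List (List Int)) : List (List Int) :=
  [0, 1, 2, 3].foldl aStep numberList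

-- ===== PORT B =====
-- the merge scan of Source B (index t advancing by 1 or 2) as structural recursion
def bMerge : List Int → List Int
  | [] => []
  | [x] => [x]
  | x :: y :: t => if x = y then x * 2 :: bMerge t else x :: bMerge (y :: t)

def bVal (merged : List Int) (i : Nat) : Int :=
  if 3 - i < merged.length then merged.getD (3 - i) 0 else 0

-- body of Source B's 'for j in range(4)' loop: compress, merge, write back padded column
def bStep (nl : List (List Int)) (j : Nat) : List (List Int) :=
  let tiles := ([3, 2, 1, 0].map (fun i => pvGetCell nl i j)).filter (· ≠ 0)
  let merged := bMerge tiles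
  [0, 1, 2, 3].foldl (fun nl2 i => pvSetCell nl2 i j (bVal merged i)) nl

def MovingDown_alt (numberList : List (List Int)) : List (List Int) :=
  [0, 1, 2, 3].foldl bStep numberList

-- ===== PRECONDITION & SPEC =====
-- A raises IndexError unless the grid has at least 4 rows whose first four each
-- have at least 4 entries; Pre_ excludes exactly those crashing inputs.
def Pre_MovingDown (numberList : List (List Int)) : Prop :=
  4 ≤ numberList.length ∧
  4 ≤ (numberList.getD 0 []).length ∧ 4 ≤ (numberList.getD 1 []).length ∧
  4 ≤ (numberList.getD 2 []).length ∧ 4 ≤ (numberList.getD 3 []).length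
instance (numberList : List (List Int)) : Decidable (Pre_MovingDown numberList) := by
  unfold Pre_MovingDown; infer_instance

def pvWitness_MovingDown : List (List Int) :=
  [[0, 2, 0, 2], [2, 0, 0, 2], [2, 2, 4, 0], [0, 2, 4, 8]]

def Spec_MovingDown (numberList : List (List Int)) (out : List (List Int)) : Prop := out = MovingDown_alt numberList
instance (numberList : List (List Int)) (out : List (List Int)) : Decidable (Spec_MovingDown numberList out) := by unfold Spec_MovingDown; infer_instance

-- ===== CLAIM (what is proved, stated in full; the proofs are below) =====
def Claim_equal_MovingDown : Prop := ∀ (numberList : List (List Int)), Dom_MovingDown numberList → Pre_MovingDown numberList → Spec_MovingDown numberList (MovingDown numberList)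

-- ===== LEMMAS AND PROOFS =====

-- per-column equality: A's num list equals B's padded merged column
set_option maxHeartbeats 2000000 in
theorem col_eq (col : Nat → Int) :
    aCol col = [0, 1, 2, 3].map (fun i =>
      bVal (bMerge (([3, 2, 1, 0].map col).filter (· ≠ 0))) i) := by
  by_cases h3 : col 3 = 0 <;> by_cases h2 : col 2 = 0 <;>
  by_cases h1 : col 1 = 0 <;> by_cases h0 : col 0 = 0 <;>
  simp [aCol, aOuter, aInner, bMerge, bVal, h3, h2, h1, h0] <;>
  split_ifs <;> simp_all [aOuter, aInner]

theorem step_eq (nl : List (List Int)) (j : Nat) : aStep nl j = bStep nl j := by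
  have h := col_eq (fun i => pvGetCell nl i j)
  simp only [aStep, bStep, h, List.foldl, List.map]
  rfl

theorem main_eq (numberList : List (List Int)) :
    MovingDown numberList = MovingDown_alt numberList := by
  simp [MovingDown, MovingDown_alt, List.foldl, step_eq]

-- ===== VERDICT (by name: the statement is the Claim_ definition above) =====
theorem MovingDown_spec : Claim_equal_MovingDown := by
  intro nl _ _
  exact main_eq nl
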